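-- pv_equiv track=rewrite | github.com/pypi-data/pypi-mirror-84 | packages/pre-commit-mirror-maker/pre_commit_mirror_maker-1.5.0.tar.gz/pre_commit_mirror_maker-1.5.0/pre_commit_mirror_maker/main.py | split_by_commas
-- ===== SOURCE A (Python) =====
-- from typing import List
-- from typing import Tuple
--
-- def split_by_commas(maybe_s: str) -> Tuple[str, ...]:
--     """Split a string by commas, but allow escaped commas.
--     - If maybe_s is falsey, returns an empty tuple
--     - Ignore backslashed commas
--     """
--     if not maybe_s:
--         return ()
--     parts: List[str] = []
--     split_by_backslash = maybe_s.split(r'\,')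
--     for split_by_backslash_part in split_by_backslash:
--         splitby_comma = split_by_backslash_part.split(',')
--         if parts:
--             parts[-1] += ',' + splitby_comma[0]
--         else:
--             parts.append(splitby_comma[0])
--         parts.extend(splitby_comma[1:])
--     return tuple(parts)
-- ===== SOURCE B (Python) =====
-- def split_by_commas(maybe_s):
--     """Single-pass scanner: walk the string once, treating '\\,' as a
--     literal comma inside the current token and an unescaped ',' as a
--     token separator."""
--     if not maybe_s:
--         return ()
--     tokens = []
--     cur = []
--     i = 0
--     n = len(maybe_s)
--     while i < n:
--         c = maybe_s[i]
--         if c == '\\' and i + 1 < n and maybe_s[i + 1] == ',':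
--             cur.append(',')
--             i += 2
--         elif c == ',':
--             tokens.append(''.join(cur))
--             cur = []
--             i += 1
--         else:
--             cur.append(c)
--             i += 1
--     tokens.append(''.join(cur))
--     return tuple(tokens)
-- ===== Notes on version B (the rewrite author's own statement) =====
-- stated objective: alternative
-- what changed: Replaced the split-and-reassemble pipeline (split on the escape sequence, split each piece on commas, glue the boundaries back together) with a single left-to-right character scanner that builds each token directly.
import Mathlib
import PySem

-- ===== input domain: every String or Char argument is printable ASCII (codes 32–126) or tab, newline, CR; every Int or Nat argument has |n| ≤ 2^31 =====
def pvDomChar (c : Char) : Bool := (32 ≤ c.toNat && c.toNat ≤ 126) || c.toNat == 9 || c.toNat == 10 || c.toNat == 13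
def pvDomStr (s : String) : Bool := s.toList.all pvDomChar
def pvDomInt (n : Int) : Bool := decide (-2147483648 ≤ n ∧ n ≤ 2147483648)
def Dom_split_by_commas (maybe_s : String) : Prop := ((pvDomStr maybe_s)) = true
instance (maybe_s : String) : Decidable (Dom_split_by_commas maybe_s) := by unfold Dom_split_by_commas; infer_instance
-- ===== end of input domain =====

-- B replaces A's split-by-'\,' / split-by-',' / glue-back pipeline with a single
-- left-to-right character scanner (alternative decomposition, same asymptotic cost).

-- ===== PORT A =====
def split_by_commas (maybe_s : String) : List String :=
  if maybe_s.toList = [] then []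
  else
    let split_by_backslash := (PySem.Chars.split? maybe_s.toList ['\\', ',']).getD []
    let parts := split_by_backslash.foldl (fun parts split_by_backslash_part =>
      let splitby_comma := (PySem.Chars.split? split_by_backslash_part [',']).getD []
      (match parts with
       | [] => [splitby_comma.headD []]
       | _ :: _ => parts.dropLast ++ [parts.getLast! ++ ',' :: splitby_comma.headD []])
        ++ splitby_comma.tail) []
    parts.map String.ofList

-- ===== PORT B =====
-- scanner loop of Source B: (remaining chars, current token, finished tokens)
def altLoop : List Char → List Char → List String → List String
  | [], cur, tokens => tokens ++ [String.ofList cur]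
  | '\\' :: ',' :: rest, cur, tokens => altLoop rest (cur ++ [',']) tokens
  | ',' :: rest, cur, tokens => altLoop rest [] (tokens ++ [String.ofList cur])
  | c :: rest, cur, tokens => altLoop rest (cur ++ [c]) tokens

def split_by_commas_alt (maybe_s : String) : List String :=
  if maybe_s.toList = [] then []
  else altLoop maybe_s.toList [] []

-- ===== PRECONDITION & SPEC =====
def Spec_split_by_commas (maybe_s : String) (out : List String) : Prop := out = split_by_commas_alt maybe_s
instance (maybe_s : String) (out : List String) : Decidable (Spec_split_by_commas maybe_s out) := by unfold Spec_split_by_commas; infer_instance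

-- ===== CLAIM (what is proved, stated in full; the proofs are below) =====
def Claim_equal_split_by_commas : Prop := ∀ (maybe_s : String), Dom_split_by_commas maybe_s → Spec_split_by_commas maybe_s (split_by_commas maybe_s)

-- ===== LEMMAS AND PROOFS =====
def consPre (pre : List Char) : List (List Char) → List (List Char)
  | [] => []
  | h :: t => (pre ++ h) :: t

def spF : List Char → List (List Char)
  | [] => [[]]
  | '\\' :: ',' :: rest => consPre [','] (spF rest)
  | ',' :: rest => [] :: spF rest
  | c :: rest => consPre [c] (spF rest)

lemma consPre_ne_nil (p : List Char) (x : List (List Char)) (h : x ≠ []) :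
    consPre p x ≠ [] := by cases x <;> simp_all [consPre]

lemma spF_ne_nil (l : List Char) : spF l ≠ [] := by
  fun_induction spF l
  · simp
  · exact consPre_ne_nil _ _ (by assumption)
  · simp
  · exact consPre_ne_nil _ _ (by assumption)

lemma consPre_consPre (p q : List Char) (x : List (List Char)) :
    consPre p (consPre q x) = consPre (p ++ q) x := by
  cases x <;> simp [consPre]

lemma consPre_nil_left (x : List (List Char)) : consPre [] x = x := by
  cases x <;> simp [consPre]

lemma spF_cons (c : Char) (rest : List Char) (h1 : ∀ r', c = '\\' → rest ≠ ',' :: r')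
    (h2 : c ≠ ',') : spF (c :: rest) = consPre [c] (spF rest) := by
  rw [spF.eq_def]
  split
  · simp_all
  · rename_i heq; injection heq with hc hr; exact absurd hr (h1 _ hc)
  · rename_i heq; injection heq with hc _; exact absurd hc h2
  · rename_i heq; injection heq with hc hr; rw [hc, hr]

lemma altLoop_eq (l : List Char) (cur : List Char) (tokens : List String) :
    altLoop l cur tokens = tokens ++ (consPre cur (spF l)).map String.ofList := by
  fun_induction altLoop l cur tokens
  · simp [spF, consPre]
  · rename_i rest cur tokens ih
    rw [ih]; simp [spF, consPre_consPre]
  · rename_i rest cur tokens ih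
    rw [ih]
    have := spF_ne_nil rest
    cases hr : spF rest <;> simp_all [spF, consPre]
  · rename_i c rest cur tokens h1 h2 ih
    rw [ih, spF_cons c rest (fun r' hc hr => h1 r' hc hr) h2, consPre_consPre]

def spl (sep : List Char) : List Char → List (List Char)
  | [] => [[]]
  | c :: rest =>
    if 0 < sep.length ∧ sep.isPrefixOf (c :: rest) then
      [] :: spl sep ((c :: rest).drop sep.length)
    else
      consPre [c] (spl sep rest)
termination_by l => l.length
decreasing_by
  · rename_i h
    have := List.IsPrefix.length_le (List.isPrefixOf_iff_prefix.mp h.2)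
    simp at this ⊢
    omega
  · simp

lemma spl_ne_nil (sep l : List Char) : spl sep l ≠ [] := by
  fun_induction spl sep l
  · simp
  · simp
  · exact consPre_ne_nil _ _ (by assumption)

lemma go_eq (sep : List Char) (hsep : sep ≠ []) (fuel : Nat) :
    ∀ l cur acc, l.length < fuel →
      PySem.Chars.splitOn.go sep fuel l cur acc
        = acc.reverse ++ consPre cur.reverse (spl sep l) := by
  induction fuel with
  | zero => intro l cur acc h; omega
  | succ n ih =>
    intro l cur acc h
    cases l with
    | nil =>
      rw [PySem.Chars.splitOn.go]
      simp [spl, consPre]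
      omega
    | cons c rest =>
      rw [PySem.Chars.splitOn.go]
      by_cases hp : sep.isPrefixOf (c :: rest)
      · have hlen : 0 < sep.length := by cases sep <;> simp_all
        have hle := List.IsPrefix.length_le (List.isPrefixOf_iff_prefix.mp hp)
        rw [if_pos hp, ih _ _ _ (by rw [List.length_drop]; simp only [List.length_cons] at *; omega)]
        rw [spl]
        rw [if_pos ⟨hlen, hp⟩]
        simp [consPre_nil_left]
        cases hc : cur.reverse with
        | nil => simp [consPre_nil_left]
        | cons a b =>
          have := spl_ne_nil sep ((c :: rest).drop sep.length)
          cases hs : spl sep ((c :: rest).drop sep.length) <;> simp_all [consPre]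
      · rw [if_neg hp, ih _ _ _ (by simp at h ⊢; omega)]
        rw [spl, if_neg (by tauto)]
        have := spl_ne_nil sep rest
        cases hs : spl sep rest <;> simp_all [consPre]

lemma splitOn_eq_spl (sep l : List Char) (hsep : sep ≠ []) :
    PySem.Chars.splitOn l sep = spl sep l := by
  rw [PySem.Chars.splitOn, go_eq sep hsep _ _ _ _ (by omega)]
  simp [consPre_nil_left]

def stepAs (parts q : List (List Char)) : List (List Char) :=
  (match parts with
   | [] => [q.headD []]
   | _ :: _ => parts.dropLast ++ [parts.getLast! ++ ',' :: q.headD []]) ++ q.tail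

lemma stepAs_nil (q : List (List Char)) (h : q ≠ []) : stepAs [] q = q := by
  cases q <;> simp_all [stepAs]

lemma gl_append (p : List (List Char)) (r0 : List Char) (r1 : List (List Char)) :
    ((p ++ r0 :: r1).getLast!) = ((r0 :: r1).getLast!) := by
  induction p with
  | nil => rfl
  | cons a as ih =>
    cases has : as ++ r0 :: r1 with
    | nil => simp at has
    | cons b bs =>
      have hx : a :: as ++ r0 :: r1 = a :: b :: bs := by simp [has]
      rw [hx, show (a :: b :: bs).getLast! = (b :: bs).getLast! by simp [List.getLast!],
        ← has, ih]

lemma stepAs_append (parts rest q : List (List Char)) (h : rest ≠ []) :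
    stepAs (parts ++ rest) q = parts ++ stepAs rest q := by
  cases rest with
  | nil => simp_all
  | cons r0 r1 =>
    cases parts with
    | nil => simp
    | cons p0 p1 =>
      simp only [stepAs]
      rw [List.dropLast_append_of_ne_nil (by simp),
        show (p0 :: p1) ++ r0 :: r1 = (p0 :: p1) ++ r0 :: r1 from rfl,
        gl_append (p0 :: p1) r0 r1]
      simp

lemma stepAs_ne_nil (parts q : List (List Char)) : stepAs parts q ≠ [] := by
  cases parts <;> simp [stepAs]

lemma foldl_stepAs_append (bs : List (List (List Char))) :
    ∀ parts rest, rest ≠ [] →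
      List.foldl stepAs (parts ++ rest) bs = parts ++ List.foldl stepAs rest bs := by
  induction bs with
  | nil => intro parts rest h; simp
  | cons q bs ih =>
    intro parts rest h
    simp only [List.foldl_cons]
    rw [stepAs_append _ _ _ h, ih _ _ (stepAs_ne_nil _ _)]

lemma foldl_stepAs_consPre (bs : List (List (List Char))) :
    ∀ (pre h : List Char) (t : List (List Char)),
      List.foldl stepAs ((pre ++ h) :: t) bs = consPre pre (List.foldl stepAs (h :: t) bs) := by
  induction bs with
  | nil => intro pre h t; simp [consPre]
  | cons q bs ih =>
    intro pre h t
    simp only [List.foldl_cons]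
    cases t with
    | nil =>
      have h1 : stepAs [pre ++ h] q = [(pre ++ (h ++ ',' :: q.headD []))] ++ q.tail := by
        simp [stepAs]
      have h2 : stepAs [h] q = [h ++ ',' :: q.headD []] ++ q.tail := by simp [stepAs]
      rw [h1, h2]
      cases ht : q.tail with
      | nil => simpa using ih pre (h ++ ',' :: q.headD []) []
      | cons a b => simpa using ih pre (h ++ ',' :: q.headD []) (a :: b)
    | cons t0 t1 =>
      have hgl : ((pre ++ h) :: t0 :: t1).getLast! = (h :: t0 :: t1).getLast! := by
        simp [List.getLast!]
      have h1 : stepAs ((pre ++ h) :: t0 :: t1) q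
          = (pre ++ h) :: ((t0 :: t1).dropLast
              ++ ([(h :: t0 :: t1).getLast! ++ ',' :: q.headD []] ++ q.tail)) := by
        simp only [stepAs, List.dropLast_cons₂, hgl]; simp
      have h2 : stepAs (h :: t0 :: t1) q
          = h :: ((t0 :: t1).dropLast
              ++ ([(h :: t0 :: t1).getLast! ++ ',' :: q.headD []] ++ q.tail)) := by
        simp only [stepAs, List.dropLast_cons₂]; simp
      rw [h1, h2, ih]

lemma spl_cons_no (sep : List Char) (c : Char) (rest : List Char)
    (h : ¬ sep.isPrefixOf (c :: rest) = true) :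
    spl sep (c :: rest) = consPre [c] (spl sep rest) := by
  rw [spl, if_neg (by tauto)]

lemma spl1_bsl (r : List Char) : spl ['\\', ','] ('\\' :: ',' :: r) = [] :: spl ['\\', ','] r := by
  rw [spl, if_pos (by simp [List.isPrefixOf])]
  rfl

lemma spl2_comma (r : List Char) : spl [','] (',' :: r) = [] :: spl [','] r := by
  rw [spl, if_pos (by simp [List.isPrefixOf])]
  rfl

lemma spl2_cons (c : Char) (r : List Char) (h : ¬ c = ',') :
    spl [','] (c :: r) = consPre [c] (spl [','] r) := by
  apply spl_cons_no
  simp [List.isPrefixOf]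
  exact fun hc => absurd hc.symm h

lemma spl_nil (sep : List Char) : spl sep [] = [[]] := by rw [spl]

lemma foldA_eq (l : List Char) :
    List.foldl stepAs [] ((spl ['\\', ','] l).map (spl [','])) = spF l := by
  fun_induction spF l with
  | case1 => simp [spl_nil, stepAs]
  | case2 rest ih =>
    rw [spl1_bsl, List.map_cons, spl_nil, List.foldl_cons, stepAs_nil _ (by simp)]
    cases hst : spl ['\\', ','] rest with
    | nil => exact absurd hst (spl_ne_nil _ _)
    | cons h t =>
      cases hq : spl [','] h with
      | nil => exact absurd hq (spl_ne_nil _ _)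
      | cons qh qt =>
        rw [hst, List.map_cons, hq, List.foldl_cons] at ih
        rw [stepAs_nil _ (by simp)] at ih
        rw [List.map_cons, hq, List.foldl_cons,
          show stepAs [[]] (qh :: qt) = ([','] ++ qh) :: qt from by simp [stepAs],
          foldl_stepAs_consPre, ih]
  | case3 rest ih =>
    rw [spl_cons_no _ _ _ (by simp [List.isPrefixOf])]
    cases hst : spl ['\\', ','] rest with
    | nil => exact absurd hst (spl_ne_nil _ _)
    | cons h t =>
      cases hq : spl [','] h with
      | nil => exact absurd hq (spl_ne_nil _ _)
      | cons qh qt =>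
        rw [hst, List.map_cons, hq, List.foldl_cons] at ih
        rw [stepAs_nil _ (by simp)] at ih
        rw [show consPre [','] (h :: t) = (',' :: h) :: t from by simp [consPre],
          List.map_cons, spl2_comma, hq, List.foldl_cons, stepAs_nil _ (by simp),
          show (([] : List Char) :: qh :: qt) = [[]] ++ (qh :: qt) from rfl,
          foldl_stepAs_append _ _ _ (by simp), ih]
        rfl
  | case4 c rest h1 h2 ih =>
    have hpre : ¬ (['\\', ','].isPrefixOf (c :: rest)) = true := by
      cases rest with
      | nil => simp [List.isPrefixOf]
      | cons r0 r1 =>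
        intro hp
        have hcr : '\\' = c ∧ ',' = r0 := by simpa [List.isPrefixOf] using hp
        exact h1 r1 hcr.1.symm (by rw [← hcr.2])
    cases hst : spl ['\\', ','] rest with
    | nil => exact absurd hst (spl_ne_nil _ _)
    | cons h t =>
      cases hq : spl [','] h with
      | nil => exact absurd hq (spl_ne_nil _ _)
      | cons qh qt =>
        rw [hst, List.map_cons, hq, List.foldl_cons] at ih
        rw [stepAs_nil _ (by simp)] at ih
        rw [spl_cons_no _ _ _ hpre, hst,
          show consPre [c] (h :: t) = (c :: h) :: t from by simp [consPre],
          List.map_cons, spl2_cons c h h2, hq,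
          show consPre [c] (qh :: qt) = (c :: qh) :: qt from by simp [consPre],
          List.foldl_cons, stepAs_nil _ (by simp),
          show ((c :: qh) :: qt) = (([c] ++ qh) :: qt) from rfl,
          foldl_stepAs_consPre, ih]

lemma split?_getD_eq_spl (part sep : List Char) (h : sep ≠ []) :
    (PySem.Chars.split? part sep).getD [] = spl sep part := by
  rw [show PySem.Chars.split? part sep = some (PySem.Chars.splitOn part sep) from by
      simp [PySem.Chars.split?, h],
    Option.getD_some, splitOn_eq_spl _ _ h]

-- ===== VERDICT (by name: the statement is the Claim_ definition above) =====
theorem split_by_commas_spec : Claim_equal_split_by_commas := by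
  unfold Claim_equal_split_by_commas Spec_split_by_commas
  intro s _
  unfold split_by_commas split_by_commas_alt
  by_cases h : s.toList = []
  · simp [h]
  · rw [if_neg h, if_neg h, altLoop_eq, consPre_nil_left]
    change (List.foldl (fun parts part => stepAs parts ((PySem.Chars.split? part [',']).getD []))
        [] ((PySem.Chars.split? s.toList ['\\', ',']).getD [])).map String.ofList = _
    rw [split?_getD_eq_spl _ _ (by simp)]
    simp only [split?_getD_eq_spl _ [','] (by simp)]
    rw [← List.foldl_map, foldA_eq]
    simp
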